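-- pv_equiv track=rewrite | github.com/hmhuy2000/LEO | bulletarm_baselines/fc_dqn/utils/dataset.py | count_objects
-- ===== SOURCE A (Python) =====
-- def count_objects(string):
--     # count the number of objects used in a string
--     count = 0
--
--     for i in range(len(string) // 2):
--
--         chars = string[i * 2: (i + 1) * 2]
--
--         if chars == "2b":
--             count += 2
--         elif chars in ["1b", "1l", "1r", "2r"]:
--             count += 1
--         else:
--             raise ValueError("bad")
--
--     return count
-- ===== SOURCE B (Python) =====
-- def count_objects(string):
--     # count the number of objects used in a string
--     count = 0
--     at_digit = True
--     prev = " "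
--     for ch in string[: len(string) // 2 * 2]:
--         if at_digit:
--             if ch not in "12":
--                 raise ValueError("bad")
--         else:
--             if ch not in "blr" or (prev == "2" and ch == "l"):
--                 raise ValueError("bad")
--             count += 2 if prev == "2" and ch == "b" else 1
--         prev = ch
--         at_digit = not at_digit
--     return count
-- ===== Notes on version B (the rewrite author's own statement) =====
-- stated objective: alternative
-- what changed: B replaces A's pair-chunking loop (slice two chars, match the pair against a table) with a character-at-a-time finite-state scan that tracks parity and the previous character, validating digits and letters by character class plus the single forbidden combination '2l', and adding the weight when the letter of a pair is consumed.
import Mathlib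
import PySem

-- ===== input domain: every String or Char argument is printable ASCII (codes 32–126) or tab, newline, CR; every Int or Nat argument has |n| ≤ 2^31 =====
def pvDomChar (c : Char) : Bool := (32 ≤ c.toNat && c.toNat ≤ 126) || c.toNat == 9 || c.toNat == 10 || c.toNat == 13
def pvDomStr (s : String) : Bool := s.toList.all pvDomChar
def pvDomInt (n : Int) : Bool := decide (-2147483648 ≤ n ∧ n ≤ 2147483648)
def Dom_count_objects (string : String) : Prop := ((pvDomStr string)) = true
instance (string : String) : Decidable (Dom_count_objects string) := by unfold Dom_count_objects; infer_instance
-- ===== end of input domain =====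

-- B replaces A's pair-chunking loop with a character-at-a-time finite-state scan
-- (parity + previous character); same exception on the same inputs, same value elsewhere.

-- ===== PORT A =====
-- one loop step of A: accumulate, or none when A raises ValueError("bad")
def pvAStep (cs : List Char) (acc : Option Int) (i : Int) : Option Int :=
  match acc with
  | none => none
  | some c =>
    let chars := PySem.List.slice cs (some (i * 2)) (some ((i + 1) * 2))
    if chars = ['2', 'b'] then some (c + 2)
    else if chars ∈ [['1','b'], ['1','l'], ['1','r'], ['2','r']] then some (c + 1)
    else none

def count_objects (string : String) : Int :=
  ((PySem.List.pyRange 0 (PySem.Int.floordiv (PySem.Str.len string) 2) 1).foldl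
      (pvAStep string.toList) (some 0)).getD 0

-- ===== PORT B =====
-- one loop step of B: state (count, at_digit, prev); none when B raises ValueError("bad")
def pvBStep (st : Option (Int × Bool × Char)) (ch : Char) : Option (Int × Bool × Char) :=
  match st with
  | none => none
  | some (count, atDigit, prev) =>
    if atDigit then
      if ch ∈ ['1', '2'] then some (count, false, ch) else none
    else
      if ch ∈ ['b', 'l', 'r'] ∧ ¬ (prev = '2' ∧ ch = 'l') then
        some (count + (if prev = '2' ∧ ch = 'b' then 2 else 1), true, ch)
      else none

def count_objects_alt (string : String) : Int :=
  let body := PySem.List.slice string.toList none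
      (some (PySem.Int.floordiv (PySem.Str.len string) 2 * 2))
  match body.foldl pvBStep (some (0, true, ' ')) with
  | some (count, _, _) => count
  | none => 0  -- raise ValueError("bad"): excluded by Pre_count_objects

-- ===== PRECONDITION & SPEC =====
-- A raises ValueError("bad") (and so does B) as soon as some 2-char pair is not one of
-- "2b","1b","1l","1r","2r"; Pre_ admits exactly the strings whose pairs are all valid.
def Pre_count_objects (string : String) : Prop :=
  ((List.range (string.toList.length / 2)).all
    (fun k => decide (((string.toList.drop (2 * k)).take 2) ∈
      [['2','b'], ['1','b'], ['1','l'], ['1','r'], ['2','r']]))) = true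
instance (string : String) : Decidable (Pre_count_objects string) := by
  unfold Pre_count_objects; infer_instance
def pvWitness_count_objects : String := "2b1l1r"

def Spec_count_objects (string : String) (out : Int) : Prop := out = count_objects_alt string
instance (string : String) (out : Int) : Decidable (Spec_count_objects string out) := by
  unfold Spec_count_objects; infer_instance

-- ===== CLAIM (what is proved, stated in full; the proofs are below) =====
def Claim_equal_count_objects : Prop :=
  ∀ (string : String), Dom_count_objects string → Pre_count_objects string →
    Spec_count_objects string (count_objects string)

-- ===== LEMMAS AND PROOFS =====

def pvValid : List (List Char) := [['2','b'], ['1','b'], ['1','l'], ['1','r'], ['2','r']]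

def pvPairs (cs : List Char) (n : Nat) : List (List Char) :=
  (PySem.List.pyRange 0 (n : Int) 1).map
    (fun i => PySem.List.slice cs (some (i * 2)) (some ((i + 1) * 2)))

lemma pvSlice_eq' (cs : List Char) (k : Nat) :
    PySem.List.slice cs (some ((k : Int) * 2)) (some (((k : Int) + 1) * 2)) =
      (cs.drop (2 * k)).take 2 := by
  have h1 : ((k : Int) * 2) = ((2 * k : Nat) : Int) := by push_cast; ring
  have h2 : (((k : Int) + 1) * 2) = ((2 * k : Nat) : Int) + ((2 : Nat) : Int) := by
    push_cast; ring
  rw [h2, h1, PySem.List.slice_natCast_add]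

lemma pvPairs_succ (cs : List Char) (n : Nat) :
    pvPairs cs (n + 1) = pvPairs cs n ++ [(cs.drop (2 * n)).take 2] := by
  unfold pvPairs
  have h : ((n + 1 : Nat) : Int) = (n : Int) + 1 := by push_cast; ring
  rw [h, PySem.List.pyRange_one_succ_right (by positivity)]
  simp [pvSlice_eq']

lemma pvKey (cs : List Char) (n : Nat)
    (h : ∀ k < n, (cs.drop (2 * k)).take 2 ∈ pvValid) :
    (PySem.List.pyRange 0 (n : Int) 1).foldl (pvAStep cs) (some 0) =
      some (((pvPairs cs n).length : Int) + ((pvPairs cs n).count ['2','b'] : Int)) := by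
  induction n with
  | zero => simp [pvPairs, PySem.List.pyRange_one_eq_nil]
  | succ m ih =>
    have hm : ∀ k < m, (cs.drop (2 * k)).take 2 ∈ pvValid := fun k hk => h k (by omega)
    have hlast : (cs.drop (2 * m)).take 2 ∈ pvValid := h m (by omega)
    have hcast : ((m + 1 : Nat) : Int) = (m : Int) + 1 := by push_cast; ring
    rw [hcast, PySem.List.pyRange_one_succ_right (by positivity), List.foldl_append,
      ih hm, pvPairs_succ]
    simp only [List.foldl_cons, List.foldl_nil, pvAStep, pvSlice_eq']
    rcases List.mem_cons.mp hlast with h2b | hrest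
    · rw [if_pos h2b, h2b]
      simp [List.count_append]
      ring
    · have hne : ¬ ((cs.drop (2 * m)).take 2 = ['2','b']) := by
        intro he; rw [he] at hrest; simp at hrest
      rw [if_neg hne, if_pos hrest]
      have hcnt : List.count ['2','b'] [(cs.drop (2 * m)).take 2] = 0 := by
        simp [List.count_cons, List.count_nil]
        intro he; exact hne he
      simp [List.count_append, hcnt]
      ring

lemma pvPairs_flatten (cs : List Char) (n : Nat) (h : 2 * n ≤ cs.length) :
    (pvPairs cs n).flatten = cs.take (2 * n) := by
  induction n with
  | zero => simp [pvPairs, PySem.List.pyRange_one_eq_nil]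
  | succ m ih =>
    rw [pvPairs_succ, List.flatten_append, ih (by omega)]
    have : 2 * (m + 1) = 2 * m + 2 := by ring
    rw [this, List.take_add]
    simp

lemma pvB_flatten (ps : List (List Char)) (h : ∀ p ∈ ps, p ∈ pvValid)
    (c : Int) (prev : Char) :
    ∃ q, ps.flatten.foldl pvBStep (some (c, true, prev)) =
      some (c + ((ps.length : Int) + (ps.count ['2','b'] : Int)), true, q) := by
  induction ps generalizing c prev with
  | nil => exact ⟨prev, by simp⟩
  | cons p t ih =>
    have hp : p ∈ pvValid := h p (by simp)
    have ht : ∀ x ∈ t, x ∈ pvValid := fun x hx => h x (by simp [hx])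
    simp only [pvValid, List.mem_cons, List.not_mem_nil, or_false] at hp
    rcases hp with rfl | rfl | rfl | rfl | rfl
    · obtain ⟨q, hq⟩ := ih ht (c + 2) 'b'
      refine ⟨q, ?_⟩
      simp [pvBStep]
      rw [hq]
      congr 2
      ring
    · obtain ⟨q, hq⟩ := ih ht (c + 1) 'b'
      refine ⟨q, ?_⟩
      simp [pvBStep]
      rw [hq]
      congr 2
      ring
    · obtain ⟨q, hq⟩ := ih ht (c + 1) 'l'
      refine ⟨q, ?_⟩
      simp [pvBStep]
      rw [hq]
      congr 2
      ring
    · obtain ⟨q, hq⟩ := ih ht (c + 1) 'r'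
      refine ⟨q, ?_⟩
      simp [pvBStep]
      rw [hq]
      congr 2
      ring
    · obtain ⟨q, hq⟩ := ih ht (c + 1) 'r'
      refine ⟨q, ?_⟩
      simp [pvBStep]
      rw [hq]
      congr 2
      ring

lemma pvFloordiv_len (s : String) :
    PySem.Int.floordiv (PySem.Str.len s) 2 = ((s.toList.length / 2 : Nat) : Int) := by
  rw [PySem.Str.len_eq]
  simp only [PySem.Int.floordiv]
  rw [Int.fdiv_eq_ediv]
  omega

lemma pvAll_iff (s : String) (hp : Pre_count_objects s) :
    ∀ k < s.toList.length / 2, (s.toList.drop (2 * k)).take 2 ∈ pvValid := by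
  unfold Pre_count_objects at hp
  rw [List.all_eq_true] at hp
  intro k hk
  have := hp k (List.mem_range.mpr hk)
  simpa [pvValid] using this

-- ===== VERDICT (by name: the statement is the Claim_ definition above) =====
theorem count_objects_spec : Claim_equal_count_objects := by
  intro s _ hp
  unfold Spec_count_objects count_objects count_objects_alt
  rw [pvFloordiv_len]
  set n := s.toList.length / 2 with hn
  have hall := pvAll_iff s hp
  rw [pvKey s.toList n hall]
  have hle : 2 * n ≤ s.toList.length := by omega
  have hbody : PySem.List.slice s.toList none (some ((n : Int) * 2)) = s.toList.take (2 * n) := by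
    have : ((n : Int) * 2) = ((2 * n : Nat) : Int) := by push_cast; ring
    rw [this, PySem.List.slice_to _ (Int.natCast_nonneg _)]
    simp
    omega
  rw [hbody, ← pvPairs_flatten s.toList n hle]
  have hmem : ∀ p ∈ pvPairs s.toList n, p ∈ pvValid := by
    intro p hpmem
    unfold pvPairs at hpmem
    rw [List.mem_map] at hpmem
    obtain ⟨i, hi, rfl⟩ := hpmem
    rw [PySem.List.mem_pyRange_one] at hi
    obtain ⟨hi0, hin⟩ := hi
    obtain ⟨k, rfl⟩ := Int.eq_ofNat_of_zero_le hi0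
    rw [pvSlice_eq']
    exact hall k (by exact_mod_cast hin)
  obtain ⟨q, hq⟩ := pvB_flatten (pvPairs s.toList n) hmem 0 ' '
  simp only [hq]
  simp
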